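-- pv_equiv track=rewrite | github.com/peg2surf/CIRCUITS | magic_circles.py | circle_hash
-- ===== SOURCE A (Python) =====
-- from collections import Counter
--
-- def dist(a, b, mod):
--   c = abs(a - b)
--   return min(c, mod - c) % mod
--
-- def circle_hash(parent: int, cords: list):
--   return "".join(map(str,(parent,
--       *(a for x in sorted(
--           Counter(
--               [dist(a, b, parent) for a, b in cords]
--           ).items(), key=lambda x: x[0]
--       ) for a in x)
--   )))
-- ===== SOURCE B (Python) =====
-- def circle_hash(parent: int, cords: list):
--   # single pass: maintain an association list of (distance, count),
--   # kept sorted ascending by distance via in-place insertion; no Counter, no sort call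
--   runs = []
--   for a, b in cords:
--     c = abs(a - b)
--     d = min(c, parent - c) % parent
--     i = 0
--     while i < len(runs) and runs[i][0] < d:
--       i += 1
--     if i < len(runs) and runs[i][0] == d:
--       runs[i][1] += 1
--     else:
--       runs.insert(i, [d, 1])
--   out = [str(parent)]
--   for d, k in runs:
--     out.append(str(d))
--     out.append(str(k))
--   return "".join(out)
-- ===== Notes on version B (the rewrite author's own statement) =====
-- stated objective: alternative
-- what changed: Removes both the Counter hash-table and the sort call: B makes a single pass over cords, maintaining an association list of (distance, count) pairs kept sorted ascending by in-place insertion (insertion position found by linear scan), then joins the parts.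
import Mathlib
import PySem

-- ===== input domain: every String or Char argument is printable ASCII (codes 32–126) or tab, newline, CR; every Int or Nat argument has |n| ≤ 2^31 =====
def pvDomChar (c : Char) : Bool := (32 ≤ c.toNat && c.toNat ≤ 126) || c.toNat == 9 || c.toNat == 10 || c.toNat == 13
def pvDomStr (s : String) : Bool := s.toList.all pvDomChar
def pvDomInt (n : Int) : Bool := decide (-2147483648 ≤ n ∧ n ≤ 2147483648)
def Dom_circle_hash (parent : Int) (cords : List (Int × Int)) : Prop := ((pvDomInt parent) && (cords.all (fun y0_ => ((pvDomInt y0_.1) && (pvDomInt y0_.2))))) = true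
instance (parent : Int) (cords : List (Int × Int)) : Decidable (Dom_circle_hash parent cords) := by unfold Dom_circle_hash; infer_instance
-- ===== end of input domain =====

-- B removes both the Counter hash-table and the sort call: one pass over cords maintains an
-- association list (distance, count) kept sorted by in-place insertion (objective: alternative).

-- ===== PORT A =====
-- helper dist(a, b, mod)
def pvDist (a b mod : Int) : Int :=
  let c := |a - b|
  PySem.Int.mod (min c (mod - c)) mod

def circle_hash (parent : Int) (cords : List (Int × Int)) : String :=
  let items := PySem.List.sorted
    (PySem.Dict.counter (cords.map (fun p => pvDist p.1 p.2 parent))).items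
    (fun x => x.1) false
  -- generator '(a for x in sorted(...) for a in x)' = flatMap over the pairs
  PySem.Str.join "" ((parent :: items.flatMap (fun x => [x.1, x.2])).map PySem.Int.toStr)

-- ===== PORT B =====
-- the body of Source B's for-loop: scan to the insertion position i (inner while), then either
-- bump the count of an equal key or insert [d, 1] there; here as structural recursion on runs
def pvIns (d : Int) : List (Int × Int) → List (Int × Int)
  | [] => [(d, 1)]
  | (k, c) :: t =>
      if k < d then (k, c) :: pvIns d t
      else if k = d then (k, c + 1) :: t
      else (d, 1) :: (k, c) :: t

def circle_hash_alt (parent : Int) (cords : List (Int × Int)) : String :=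
  let runs := cords.foldl (fun acc p =>
      let c := |p.1 - p.2|
      pvIns (PySem.Int.mod (min c (parent - c)) parent) acc) []
  let out := runs.foldl
      (fun o g => o ++ [PySem.Int.toStr g.1, PySem.Int.toStr g.2])
      [PySem.Int.toStr parent]
  PySem.Str.join "" out

-- ===== PRECONDITION & SPEC =====
-- Pre_ excludes only parent = 0 with nonempty cords: there each '% parent' raises
-- ZeroDivisionError in Python (in A's dist and in B's loop alike).
def Pre_circle_hash (parent : Int) (cords : List (Int × Int)) : Prop :=
  parent ≠ 0 ∨ cords = []
instance (parent : Int) (cords : List (Int × Int)) : Decidable (Pre_circle_hash parent cords) := by unfold Pre_circle_hash; infer_instance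

def pvWitness_circle_hash : Int × (List (Int × Int)) := (5, [(0, 1), (2, 4)])

def Spec_circle_hash (parent : Int) (cords : List (Int × Int)) (out : String) : Prop := out = circle_hash_alt parent cords
instance (parent : Int) (cords : List (Int × Int)) (out : String) : Decidable (Spec_circle_hash parent cords out) := by unfold Spec_circle_hash; infer_instance

-- ===== CLAIM (what is proved, stated in full; the proofs are below) =====
def Claim_equal_circle_hash : Prop := ∀ (parent : Int) (cords : List (Int × Int)), Dom_circle_hash parent cords → Pre_circle_hash parent cords → Spec_circle_hash parent cords (circle_hash parent cords)

-- ===== LEMMAS AND PROOFS =====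

-- count stored for key d in a key-sorted association list (0 if absent)
def pvCnt (acc : List (Int × Int)) (d : Int) : Int :=
  (((acc.find? (fun g => g.1 == d)).map Prod.snd).getD 0)

theorem pvIns_pairwise (d : Int) : ∀ (acc : List (Int × Int)),
    acc.Pairwise (fun a b => a.1 < b.1) → (pvIns d acc).Pairwise (fun a b => a.1 < b.1) := by
  intro acc
  induction acc with
  | nil => intro _; simp [pvIns]
  | cons hd t ih =>
    obtain ⟨k, c⟩ := hd
    intro h
    by_cases h1 : k < d
    · simp only [pvIns, if_pos h1]
      refine List.Pairwise.cons ?_ (ih h.of_cons)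
      intro q hq
      rcases hq with hq
      -- q ∈ pvIns d t : every key there is d or a key of t
      have : q.1 = d ∨ q ∈ t := by
        clear ih h
        induction t with
        | nil =>
            simp only [pvIns, List.mem_singleton] at hq
            exact Or.inl (by rw [hq])
        | cons u r ihr =>
          obtain ⟨uk, uc⟩ := u
          by_cases hu1 : uk < d
          · simp only [pvIns, if_pos hu1] at hq
            rcases List.mem_cons.mp hq with rfl | hq'
            · simp
            · rcases ihr hq' with h' | h'
              · exact Or.inl h'
              · exact Or.inr (List.mem_cons_of_mem _ h')
          · by_cases hu2 : uk = d
            · simp only [pvIns, if_neg hu1, if_pos hu2] at hq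
              rcases List.mem_cons.mp hq with rfl | hq'
              · exact Or.inl hu2
              · exact Or.inr (List.mem_cons_of_mem _ hq')
            · simp only [pvIns, if_neg hu1, if_neg hu2] at hq
              rcases List.mem_cons.mp hq with rfl | hq'
              · exact Or.inl rfl
              · exact Or.inr hq'
      rcases this with h' | h'
      · omega
      · exact List.rel_of_pairwise_cons h h'
    · by_cases h2 : k = d
      · simp only [pvIns, if_neg h1, if_pos h2]
        exact List.Pairwise.cons (fun q hq => List.rel_of_pairwise_cons h hq) h.of_cons
      · simp only [pvIns, if_neg h1, if_neg h2]
        refine List.Pairwise.cons ?_ h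
        intro q hq
        rcases List.mem_cons.mp hq with rfl | hq'
        · simpa using by omega
        · have := List.rel_of_pairwise_cons h hq'
          simp only
          omega

theorem pvIns_mem (d : Int) : ∀ (acc : List (Int × Int)),
    acc.Pairwise (fun a b => a.1 < b.1) →
    ∀ p : Int × Int, p ∈ pvIns d acc ↔ (p = (d, pvCnt acc d + 1)) ∨ (p.1 ≠ d ∧ p ∈ acc) := by
  intro acc
  induction acc with
  | nil => intro _ p; simp [pvIns, pvCnt]
  | cons hd t ih =>
    obtain ⟨k, c⟩ := hd
    intro h p
    by_cases h1 : k < d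
    · have hkd : k ≠ d := by omega
      have hcnt : pvCnt ((k, c) :: t) d = pvCnt t d := by
        simp [pvCnt, hkd]
      simp only [pvIns, if_pos h1, List.mem_cons, ih h.of_cons, hcnt]
      constructor
      · rintro (rfl | h' | h')
        · exact Or.inr ⟨hkd, Or.inl rfl⟩
        · exact Or.inl h'
        · exact Or.inr ⟨h'.1, Or.inr h'.2⟩
      · rintro (h' | ⟨hne, rfl | h'⟩)
        · exact Or.inr (Or.inl h')
        · exact Or.inl rfl
        · exact Or.inr (Or.inr ⟨hne, h'⟩)
    · by_cases h2 : k = d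
      · have hcnt : pvCnt ((k, c) :: t) d = c := by simp [pvCnt, h2]
        have htne : ∀ q ∈ t, q.1 ≠ d := by
          intro q hq he
          have := List.rel_of_pairwise_cons h hq
          simp only at this
          omega
        simp only [pvIns, if_neg h1, if_pos h2, List.mem_cons, hcnt]
        subst h2
        constructor
        · rintro (rfl | h')
          · exact Or.inl rfl
          · exact Or.inr ⟨htne p h', Or.inr h'⟩
        · rintro (rfl | ⟨hne, rfl | h'⟩)
          · exact Or.inl rfl
          · exact absurd rfl hne
          · exact Or.inr h'
      · have hdk : d < k := by omega
        have hcnt : pvCnt ((k, c) :: t) d = 0 := by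
          have : List.find? (fun g => g.1 == d) ((k, c) :: t) = none := by
            apply List.find?_eq_none.mpr
            intro q hq
            rcases List.mem_cons.mp hq with rfl | hq'
            · simpa using by omega
            · have := List.rel_of_pairwise_cons h hq'
              simpa using by omega
          simp [pvCnt, this]
        have hne : ∀ q ∈ (k, c) :: t, q.1 ≠ d := by
          intro q hq
          rcases List.mem_cons.mp hq with rfl | hq'
          · simpa using by omega
          · have := List.rel_of_pairwise_cons h hq'
            omega
        simp only [pvIns, if_neg h1, if_neg h2, List.mem_cons, hcnt, zero_add]
        constructor
        · rintro (rfl | h')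
          · exact Or.inl rfl
          · exact Or.inr ⟨hne p (List.mem_cons.mpr h'), h'⟩
        · rintro (rfl | ⟨_, h'⟩)
          · exact Or.inl rfl
          · exact Or.inr h'

-- the loop invariant: acc is key-sorted and holds exactly the counts of the distances seen so far
def pvInv (seen : List Int) (acc : List (Int × Int)) : Prop :=
  acc.Pairwise (fun a b => a.1 < b.1) ∧
  ∀ p : Int × Int, p ∈ acc ↔ p.1 ∈ seen ∧ p.2 = (seen.count p.1 : Int)

theorem pvCnt_of_inv (seen : List Int) (acc : List (Int × Int)) (h : pvInv seen acc) (d : Int) :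
    pvCnt acc d = (seen.count d : Int) := by
  obtain ⟨hpw, hmem⟩ := h
  by_cases hd : d ∈ seen
  · have hin : (d, (seen.count d : Int)) ∈ acc := (hmem _).mpr ⟨hd, rfl⟩
    -- find? finds exactly this pair: keys are distinct
    clear hmem
    induction acc with
    | nil => simp at hin
    | cons u t ihu =>
      obtain ⟨uk, uc⟩ := u
      rcases List.mem_cons.mp hin with he | hin'
      · obtain ⟨he1, he2⟩ := Prod.mk.injEq .. ▸ he
        simp [pvCnt, ← he1, ← he2]
      · have hne : uk ≠ d := by
          have := List.rel_of_pairwise_cons hpw hin'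
          simp only at this
          omega
        simpa [pvCnt, List.find?_cons, hne] using ihu hpw.of_cons hin'
  · have : List.find? (fun g => g.1 == d) acc = none := by
      apply List.find?_eq_none.mpr
      intro q hq
      have := ((hmem q).mp hq).1
      simp only [beq_iff_eq]
      intro he
      exact hd (he ▸ this)
    simp [pvCnt, this, List.count_eq_zero.mpr hd]

theorem pvInv_step (seen : List Int) (acc : List (Int × Int)) (d : Int) (h : pvInv seen acc) :
    pvInv (seen ++ [d]) (pvIns d acc) := by
  refine ⟨pvIns_pairwise d acc h.1, ?_⟩
  intro p
  rw [pvIns_mem d acc h.1 p, pvCnt_of_inv seen acc h d, h.2 p]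
  constructor
  · rintro (rfl | ⟨hne, hm, hc⟩)
    · refine ⟨by simp, ?_⟩
      have hc1 : (seen ++ [d]).count d = seen.count d + 1 := by
        rw [List.count_append]; simp
      rw [hc1]; push_cast; ring
    · refine ⟨by simp [hm], ?_⟩
      have h1 : List.count p.1 [d] = 0 := List.count_eq_zero.mpr (by simp [hne])
      have h0 : (seen ++ [d]).count p.1 = seen.count p.1 := by
        rw [List.count_append, h1]; omega
      rw [h0]; exact hc
  · rintro ⟨hm, hc⟩
    by_cases hp : p.1 = d
    · left
      have h2 : p.2 = (seen.count d : Int) + 1 := by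
        rw [hc, hp]
        have hc1 : (seen ++ [d]).count d = seen.count d + 1 := by
          rw [List.count_append]; simp
        rw [hc1]; push_cast; ring
      calc p = (p.1, p.2) := rfl
        _ = (d, (seen.count d : Int) + 1) := by rw [hp, h2]
    · right
      have hm' : p.1 ∈ seen := by
        rcases List.mem_append.mp hm with h' | h'
        · exact h'
        · exact absurd (List.mem_singleton.mp h') hp
      have h1 : List.count p.1 [d] = 0 := List.count_eq_zero.mpr (by simp [hp])
      have h0 : (seen ++ [d]).count p.1 = seen.count p.1 := by
        rw [List.count_append, h1]; omega
      exact ⟨hp, hm', by rw [hc, h0]⟩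

theorem pvInv_fold : ∀ (ds seen : List Int) (acc : List (Int × Int)), pvInv seen acc →
    pvInv (seen ++ ds) (ds.foldl (fun a d => pvIns d a) acc) := by
  intro ds
  induction ds with
  | nil => intro seen acc h; simpa using h
  | cons d t ih =>
    intro seen acc h
    have := ih (seen ++ [d]) (pvIns d acc) (pvInv_step seen acc d h)
    simpa [List.append_assoc] using this

-- A's sorted Counter items equal B's insertion-built run list
theorem pv_main (ds : List Int) :
    PySem.List.sorted (PySem.Dict.counter ds).items (fun x => x.1) false
      = ds.foldl (fun a d => pvIns d a) [] := by
  have hinv : pvInv ds (ds.foldl (fun a d => pvIns d a) []) := by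
    have := pvInv_fold ds [] [] ⟨List.Pairwise.nil, by simp⟩
    simpa using this
  apply PySem.List.sorted_eq_of_perm_of_pairwise_lt
  · rw [PySem.Dict.items_counter]
    have n1 : (ds.foldl (fun a d => pvIns d a) []).Nodup :=
      hinv.1.imp (fun hab => by intro he; rw [he] at hab; exact absurd hab (lt_irrefl _))
    have n2 : ((PySem.Set.ofList ds).map (fun k => (k, (ds.count k : Int)))).Nodup :=
      (PySem.Set.nodup_ofList ds).map (fun a b hab => congrArg Prod.fst hab)
    rw [List.perm_ext_iff_of_nodup n1 n2]
    intro p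
    rw [hinv.2 p, List.mem_map]
    constructor
    · rintro ⟨h1, h2⟩
      exact ⟨p.1, (PySem.Set.mem_ofList _ _).mpr h1, by rw [← h2]⟩
    · rintro ⟨k, hk, rfl⟩
      exact ⟨(PySem.Set.mem_ofList _ _).mp hk, rfl⟩
  · exact hinv.1

-- ===== VERDICT (by name: the statement is the Claim_ definition above) =====
theorem circle_hash_spec : Claim_equal_circle_hash := by
  intro parent cords _ _
  unfold Spec_circle_hash circle_hash circle_hash_alt
  have hfold : cords.foldl (fun acc p =>
      let c := |p.1 - p.2|
      pvIns (PySem.Int.mod (min c (parent - c)) parent) acc) []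
      = (cords.map (fun p => pvDist p.1 p.2 parent)).foldl (fun a d => pvIns d a) [] := by
    rw [List.foldl_map]
    rfl
  rw [hfold, ← pv_main]
  simp only [PySem.List.foldl_append_eq_flatMap]
  simp [List.map_flatMap]
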